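-- pv_equiv track=rewrite | github.com/cea-hpc/phobos | src/cli/phobos/core/dss.py | key_convert
-- ===== SOURCE A (Python) =====
-- FILTER_OPERATORS = (
--     ('__not', '$NOR'),
--     ('__gt', '$GT'),
--     ('__ge', '$GTE'),
--     ('__lt', '$LT'),
--     ('__le', '$LTE'),
--     ('__like', '$LIKE'),
--     ('__regexp', '$REGEXP'),
--     ('__jcontain', '$INJSON'),
--     ('__jkeyval', '$KVINJSON'),
--     ('__jexist', '$XJSON'),
-- )
--
-- OBJECT_PREFIXES = {
--     'device': 'DSS::DEV::',
--     'layout': 'DSS::EXT::',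
--     'media':  'DSS::MDA::',
-- }
--
-- def key_convert(obj_type, key):
--     """Split key, return actual name and associated operator."""
--     kname = key
--     comp = None # default (equal)
--     kname_prefx = OBJECT_PREFIXES[obj_type] # KeyError on unsupported obj_type
--     for sufx, comp_enum in FILTER_OPERATORS:
--         if key.endswith(sufx):
--             kname, comp = key[:-len(sufx)], comp_enum
--             break
--     return "%s%s" % (kname_prefx, kname), comp
-- ===== SOURCE B (Python) =====
-- OBJECT_PREFIXES = {
--     'device': 'DSS::DEV::',
--     'layout': 'DSS::EXT::',
--     'media':  'DSS::MDA::',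
-- }
--
-- # operator word (the suffix without its leading '__') -> enum
-- _OPERATORS = {
--     'not': '$NOR',
--     'gt': '$GT',
--     'ge': '$GTE',
--     'lt': '$LT',
--     'le': '$LTE',
--     'like': '$LIKE',
--     'regexp': '$REGEXP',
--     'jcontain': '$INJSON',
--     'jkeyval': '$KVINJSON',
--     'jexist': '$XJSON',
-- }
--
-- def key_convert(obj_type, key):
--     """Split key, return actual name and associated operator."""
--     prefix = OBJECT_PREFIXES[obj_type]  # KeyError on unsupported obj_type
--     head, sep, tail = key.rpartition('__')
--     if sep and tail in _OPERATORS: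
--         return prefix + head, _OPERATORS[tail]
--     return prefix + key, None
-- ===== Notes on version B (the rewrite author's own statement) =====
-- stated objective: idiomatic
-- what changed: B replaces A's linear scan over the ten '__'-suffixes (endswith per entry, break on first hit) by a single key.rpartition('__') split followed by one dict lookup of the operator word after the last '__'.
import Mathlib
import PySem

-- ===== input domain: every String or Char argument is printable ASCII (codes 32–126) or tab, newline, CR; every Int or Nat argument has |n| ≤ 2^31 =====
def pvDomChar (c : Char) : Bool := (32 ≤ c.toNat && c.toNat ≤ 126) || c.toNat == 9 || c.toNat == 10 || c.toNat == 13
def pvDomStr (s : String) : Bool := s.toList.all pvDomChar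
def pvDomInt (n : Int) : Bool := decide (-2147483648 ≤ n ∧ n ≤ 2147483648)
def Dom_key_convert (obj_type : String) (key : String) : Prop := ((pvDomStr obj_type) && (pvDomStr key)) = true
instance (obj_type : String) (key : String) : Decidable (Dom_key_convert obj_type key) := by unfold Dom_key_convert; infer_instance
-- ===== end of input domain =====

-- B replaces A's scan over the ten '__'-suffixes by one rpartition('__') split plus one
-- dict lookup of the operator word (objective: idiomatic; same return value wherever A returns).

-- ===== PORT A =====
-- OBJECT_PREFIXES (shared module constant; both Pythons read the same dict)
def pvObjectPrefixes : PySem.Dict String String :=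
  PySem.Dict.ofList [("device", "DSS::DEV::"), ("layout", "DSS::EXT::"), ("media", "DSS::MDA::")]

-- FILTER_OPERATORS, suffixes as char lists (strings are ported on the List Char side)
def pvFilterOperators : List (List Char × String) :=
  [(['_','_','n','o','t'], "$NOR"),
   (['_','_','g','t'], "$GT"),
   (['_','_','g','e'], "$GTE"),
   (['_','_','l','t'], "$LT"),
   (['_','_','l','e'], "$LTE"),
   (['_','_','l','i','k','e'], "$LIKE"),
   (['_','_','r','e','g','e','x','p'], "$REGEXP"),
   (['_','_','j','c','o','n','t','a','i','n'], "$INJSON"),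
   (['_','_','j','k','e','y','v','a','l'], "$KVINJSON"),
   (['_','_','j','e','x','i','s','t'], "$XJSON")]

-- A's for-loop with break: scan the operator table, first suffix match wins
def pvScanA (key : List Char) : List (List Char × String) → List Char × Option String
  | [] => (key, none)
  | (sufx, comp_enum) :: rest =>
      if PySem.Chars.endswith key sufx then
        (PySem.List.slice key none (some (-(sufx.length : Int))), some comp_enum)  -- key[:-len(sufx)]
      else pvScanA key rest

def key_convert (obj_type : String) (key : String) : String × Option String :=
  let kname_prefx := (PySem.Dict.get? pvObjectPrefixes obj_type).getD ""  -- KeyError (excluded by Pre_) on a missing obj_type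
  let res := pvScanA key.toList pvFilterOperators
  (kname_prefx ++ String.ofList res.1, res.2)

-- ===== PORT B =====
-- B's _OPERATORS dict: operator word -> enum (association list, lookup = first match)
def pvOperators : List (List Char × String) :=
  [(['n','o','t'], "$NOR"),
   (['g','t'], "$GT"),
   (['g','e'], "$GTE"),
   (['l','t'], "$LT"),
   (['l','e'], "$LTE"),
   (['l','i','k','e'], "$LIKE"),
   (['r','e','g','e','x','p'], "$REGEXP"),
   (['j','c','o','n','t','a','i','n'], "$INJSON"),
   (['j','k','e','y','v','a','l'], "$KVINJSON"),
   (['j','e','x','i','s','t'], "$XJSON")]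

-- key.rpartition('__'), as a scan of the reversed char list for the first '__' pair:
-- some (tailRev, headRev) means key = headRev.reverse ++ "__" ++ tailRev.reverse; none means no '__' in key
def pvRfindDU : List Char → Option (List Char × List Char)
  | [] => none
  | c :: t =>
      if c = '_' ∧ t.head? = some '_' then some ([], t.tail)
      else (pvRfindDU t).map (fun pr => (c :: pr.1, pr.2))

def key_convert_alt (obj_type : String) (key : String) : String × Option String :=
  let prefx := (PySem.Dict.get? pvObjectPrefixes obj_type).getD ""  -- KeyError (excluded by Pre_) on a missing obj_type
  match pvRfindDU key.toList.reverse with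
  | some (p, r) =>  -- sep == '__': head = r.reverse, tail = p.reverse
      match pvOperators.find? (fun wc => wc.1 == p.reverse) with
      | some wc => (prefx ++ String.ofList r.reverse, some wc.2)
      | none => (prefx ++ key, none)
  | none => (prefx ++ key, none)

-- ===== PRECONDITION & SPEC =====
-- Pre_ excludes exactly the obj_type values outside OBJECT_PREFIXES, on which the Python A raises KeyError.
def Pre_key_convert (obj_type : String) (key : String) : Prop :=
  obj_type = "device" ∨ obj_type = "layout" ∨ obj_type = "media"
instance (obj_type : String) (key : String) : Decidable (Pre_key_convert obj_type key) := by unfold Pre_key_convert; infer_instance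

def pvWitness_key_convert : String × String := ("device", "size__gt")

def Spec_key_convert (obj_type : String) (key : String) (out : String × Option String) : Prop := out = key_convert_alt obj_type key
instance (obj_type : String) (key : String) (out : String × Option String) : Decidable (Spec_key_convert obj_type key out) := by unfold Spec_key_convert; infer_instance

-- ===== CLAIM (what is proved, stated in full; the proofs are below) =====
def Claim_equal_key_convert : Prop := ∀ (obj_type : String) (key : String), Dom_key_convert obj_type key → Pre_key_convert obj_type key → Spec_key_convert obj_type key (key_convert obj_type key)

-- ===== LEMMAS AND PROOFS =====

-- pvRfindDU soundness: a hit really is a '__' split, and it is the earliest one in the reversed list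
theorem pvRfindDU_sound (rev p r : List Char) (h : pvRfindDU rev = some (p, r)) :
    rev = p ++ '_' :: '_' :: r ∧ ∀ a b : List Char, rev = a ++ '_' :: '_' :: b → p.length ≤ a.length := by
  induction rev generalizing p r with
  | nil => simp [pvRfindDU] at h
  | cons c t ih =>
    rw [pvRfindDU] at h
    split at h
    · rename_i hc
      obtain ⟨hc1, hc2⟩ := hc
      cases t with
      | nil => simp at hc2
      | cons x t' =>
        simp only [List.head?_cons, Option.some.injEq] at hc2
        simp only [List.tail_cons, Option.some.injEq, Prod.mk.injEq] at h
        obtain ⟨h1, h2⟩ := h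
        subst hc1; subst hc2; subst h2
        refine ⟨by rw [← h1]; rfl, ?_⟩
        intro a b _
        rw [← h1]
        exact Nat.zero_le _
    · rename_i hc
      simp only [Option.map_eq_some_iff] at h
      obtain ⟨⟨p', r'⟩, hfd, heq⟩ := h
      simp only [Prod.mk.injEq] at heq
      obtain ⟨h1, h2⟩ := heq
      obtain ⟨ht, hmin⟩ := ih p' r' hfd
      refine ⟨by rw [← h1, ← h2]; simp [ht], ?_⟩
      intro a b hab
      cases a with
      | nil =>
        simp only [List.nil_append] at hab
        injection hab with h3 h4
        exact absurd ⟨h3, by rw [h4]; rfl⟩ hc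
      | cons d a' =>
        simp only [List.cons_append, List.cons.injEq] at hab
        have := hmin a' b hab.2
        rw [← h1]
        simpa using this

-- pvRfindDU completeness: it cannot miss a '__' split
theorem pvRfindDU_complete (a b : List Char) : pvRfindDU (a ++ '_' :: '_' :: b) ≠ none := by
  induction a with
  | nil =>
    simp only [List.nil_append]
    rw [pvRfindDU.eq_def]
    simp
  | cons c a' ih =>
    rw [List.cons_append, pvRfindDU]
    split
    · exact Option.some_ne_none _
    · simp only [ne_eq, Option.map_eq_none_iff]
      exact ih

-- the operator word before the earliest '__' of the reversed list is unique among '_'-free words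
theorem pvSplit_uniq (w : List Char) (hw : '_' ∉ w) :
    ∀ p r s : List Char,
      (∀ a b : List Char, p ++ '_' :: '_' :: r = a ++ '_' :: '_' :: b → p.length ≤ a.length) →
      p ++ '_' :: '_' :: r = w ++ '_' :: '_' :: s → w = p ∧ s = r := by
  induction w with
  | nil =>
    intro p r s hmin heq
    have hp : p.length ≤ 0 := hmin [] s (by simpa using heq)
    have hpnil : p = [] := List.eq_nil_of_length_eq_zero (Nat.le_zero.mp hp)
    subst hpnil
    simp at heq
    exact ⟨rfl, heq.symm⟩
  | cons c w' ih =>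
    intro p r s hmin heq
    have hc : c ≠ '_' := fun h => hw (by simp [h])
    have hw' : '_' ∉ w' := fun h => hw (by simp [h])
    cases p with
    | nil => simp at heq; exact absurd heq.1.symm hc
    | cons d p' =>
      simp only [List.cons_append, List.cons.injEq] at heq
      obtain ⟨hdc, heq'⟩ := heq
      have hmin' : ∀ a b : List Char, p' ++ '_' :: '_' :: r = a ++ '_' :: '_' :: b → p'.length ≤ a.length := by
        intro a b hab
        have := hmin (d :: a) b (by simp [hab])
        simpa using this
      obtain ⟨h1, h2⟩ := ih hw' p' r s hmin' heq'
      exact ⟨by rw [hdc, h1], h2⟩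

-- A's suffix scan over a table of '__'-prefixed '_'-free words equals B's split-and-lookup
theorem pvScanA_eq (l : List Char) (ops : List (List Char × String))
    (hops : ∀ wc ∈ ops, '_' ∉ wc.1) :
    pvScanA l (ops.map (fun wc => ('_' :: '_' :: wc.1, wc.2))) =
      (match pvRfindDU l.reverse with
       | none => (l, none)
       | some (p, r) =>
           match ops.find? (fun wc => wc.1 == p.reverse) with
           | some wc => (r.reverse, some wc.2)
           | none => (l, none)) := by
  induction ops with
  | nil =>
    cases h : pvRfindDU l.reverse with
    | none => simp [pvScanA]
    | some pr => obtain ⟨p, r⟩ := pr; simp [pvScanA]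
  | cons wc rest ih =>
    obtain ⟨w, c⟩ := wc
    have hw : '_' ∉ w := hops (w, c) (by simp)
    have hrest : ∀ wc ∈ rest, '_' ∉ wc.1 := fun x hx => hops x (by simp [hx])
    rw [List.map_cons, pvScanA]
    cases hfd : pvRfindDU l.reverse with
    | none =>
      have hend : ¬ PySem.Chars.endswith l ('_' :: '_' :: w) = true := by
        rw [PySem.Chars.endswith_iff]
        rintro ⟨t, ht⟩
        have hrev : l.reverse = w.reverse ++ '_' :: '_' :: t.reverse := by
          rw [← ht]; simp
        exact pvRfindDU_complete w.reverse t.reverse (hrev ▸ hfd)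
      rw [if_neg hend, ih hrest, hfd]
    | some pr =>
      obtain ⟨p, r⟩ := pr
      obtain ⟨hsplit, hmin⟩ := pvRfindDU_sound l.reverse p r hfd
      have hl : l = r.reverse ++ '_' :: '_' :: p.reverse := by
        have := congrArg List.reverse hsplit
        simpa using this
      by_cases hwp : w = p.reverse
      · have hbeq : (w == p.reverse) = true := by simpa using hwp
        have hend : PySem.Chars.endswith l ('_' :: '_' :: w) = true := by
          rw [PySem.Chars.endswith_iff]
          exact ⟨r.reverse, by rw [hl, hwp]⟩
        rw [if_pos hend]
        have hslice : PySem.List.slice l none (some (-((('_' :: '_' :: w).length : Nat) : Int)))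
            = l.take (l.length - ('_' :: '_' :: w).length) :=
          PySem.List.slice_to_neg_natCast l ('_' :: '_' :: w).length (by simp)
        have htake : l.take (l.length - ('_' :: '_' :: w).length) = r.reverse := by
          rw [hl, hwp]
          have hlen2 : (r.reverse ++ '_' :: '_' :: p.reverse).length - ('_' :: '_' :: p.reverse).length
              = r.reverse.length := by simp
          rw [hlen2, List.take_left]
        simp only [List.find?, hbeq, hslice, htake]
      · have hbeq : (w == p.reverse) = false := by simpa using hwp
        have hend : ¬ PySem.Chars.endswith l ('_' :: '_' :: w) = true := by
          rw [PySem.Chars.endswith_iff]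
          rintro ⟨t, ht⟩
          have hsplit2 : p ++ '_' :: '_' :: r = w.reverse ++ '_' :: '_' :: t.reverse := by
            rw [← hsplit, ← ht]; simp
          have hwrev : '_' ∉ w.reverse := by simpa using hw
          have huniq := pvSplit_uniq w.reverse hwrev p r t.reverse (hsplit ▸ hmin) hsplit2
          exact hwp (by rw [← huniq.1]; simp)
        rw [if_neg hend, ih hrest, hfd]
        simp only [List.find?, hbeq]

-- A's literal table is B's word table with '__' prepended to every word
theorem pvTables_eq : pvFilterOperators = pvOperators.map (fun wc => ('_' :: '_' :: wc.1, wc.2)) := by rfl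

-- ===== VERDICT (by name: the statement is the Claim_ definition above) =====
theorem key_convert_spec : Claim_equal_key_convert := by
  intro obj_type key _ _
  unfold Spec_key_convert key_convert key_convert_alt
  rw [pvTables_eq, pvScanA_eq key.toList pvOperators (by decide)]
  cases hfd : pvRfindDU key.toList.reverse with
  | none => simp [String.ofList_toList]
  | some pr =>
    obtain ⟨p, r⟩ := pr
    cases hfind : pvOperators.find? (fun wc => wc.1 == p.reverse) with
    | none => simp only [hfind]; simp [String.ofList_toList]
    | some wc => simp only [hfind]
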